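-- pv_equiv track=rewrite | github.com/tayal1989/python-algorithms | programs/UptoVowel.py | upto_vowel
-- ===== SOURCE A (Python) =====
-- def upto_vowel(input_string):
--     output_string = ""
--     for i in range(len(input_string)):
--         if input_string[i] in 'aeiouAEIOU':
--             break
--         else:
--             output_string = output_string + input_string[i]
--     return output_string
-- ===== SOURCE B (Python) =====
-- def upto_vowel(input_string):
--     vowels = set('aeiouAEIOU')
--     idx = next((i for i, ch in enumerate(input_string) if ch in vowels), len(input_string))
--     return input_string[:idx]
-- ===== Notes on version B (the rewrite author's own statement) =====
-- stated objective: idiomatic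
-- what changed: Replaces the index loop that accumulates characters by repeated string concatenation with a one-pass search for the first vowel's index followed by a single slice.
import Mathlib
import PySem

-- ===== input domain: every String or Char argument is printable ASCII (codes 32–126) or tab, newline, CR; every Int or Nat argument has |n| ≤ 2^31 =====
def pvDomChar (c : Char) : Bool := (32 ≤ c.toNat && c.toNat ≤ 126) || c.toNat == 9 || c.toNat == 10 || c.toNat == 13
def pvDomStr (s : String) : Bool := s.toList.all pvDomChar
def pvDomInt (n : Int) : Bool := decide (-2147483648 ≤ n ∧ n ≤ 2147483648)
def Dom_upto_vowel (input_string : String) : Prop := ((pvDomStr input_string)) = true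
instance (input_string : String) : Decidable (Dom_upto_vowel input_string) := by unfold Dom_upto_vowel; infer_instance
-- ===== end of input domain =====

-- B replaces A's quadratic concatenating loop with a find-first-vowel-index + single slice (idiomatic, one pass).

-- ===== PORT A =====
-- A: accumulate characters one by one until the first vowel, by string concatenation.
def pvVowelA (c : Char) : Bool := "aeiouAEIOU".toList.contains c

def uptoLoopA : List Char → List Char → List Char
  | [], acc => acc
  | c :: rest, acc => if pvVowelA c then acc else uptoLoopA rest (acc ++ [c])

def upto_vowel (input_string : String) : String :=
  String.mk (uptoLoopA input_string.toList [])

-- ===== PORT B =====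
-- B: index of first vowel (or length), then one slice.
def pvVowelB (c : Char) : Bool := "aeiouAEIOU".toList.contains c

def upto_vowel_alt (input_string : String) : String :=
  let cs := input_string.toList
  let idx := (cs.findIdx? pvVowelB).getD cs.length
  String.mk (cs.take idx)

-- ===== PRECONDITION & SPEC =====
def Spec_upto_vowel (input_string : String) (out : String) : Prop := out = upto_vowel_alt input_string
instance (input_string : String) (out : String) : Decidable (Spec_upto_vowel input_string out) := by unfold Spec_upto_vowel; infer_instance

-- ===== CLAIM (what is proved, stated in full; the proofs are below) =====
def Claim_equal_upto_vowel : Prop := ∀ (input_string : String), Dom_upto_vowel input_string → Spec_upto_vowel input_string (upto_vowel input_string)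

-- ===== LEMMAS AND PROOFS =====
theorem uptoLoopA_eq_takeWhile (cs : List Char) (acc : List Char) :
    uptoLoopA cs acc = acc ++ cs.takeWhile (fun c => !pvVowelA c) := by
  induction cs generalizing acc with
  | nil => simp [uptoLoopA]
  | cons c rest ih =>
    by_cases h : pvVowelA c = true
    · simp [uptoLoopA, List.takeWhile, h]
    · simp only [Bool.not_eq_true] at h
      simp [uptoLoopA, List.takeWhile, h, ih]

theorem take_findIdx_eq_takeWhile (cs : List Char) :
    cs.take ((cs.findIdx? pvVowelB).getD cs.length) = cs.takeWhile (fun c => !pvVowelB c) := by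
  induction cs with
  | nil => simp
  | cons c rest ih =>
    by_cases h : pvVowelB c = true
    · simp [List.findIdx?_cons, List.takeWhile, h]
    · simp only [Bool.not_eq_true] at h
      simp only [List.findIdx?_cons, h, Bool.false_eq_true, if_false, List.takeWhile,
        Bool.not_false]
      cases hf : rest.findIdx? pvVowelB with
      | none => simpa [hf] using ih
      | some i => simpa [hf] using ih

-- ===== VERDICT (by name: the statement is the Claim_ definition above) =====
theorem upto_vowel_spec : Claim_equal_upto_vowel := by
  intro s _
  show _ = _
  simp only [upto_vowel, upto_vowel_alt, uptoLoopA_eq_takeWhile,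
    take_findIdx_eq_takeWhile, List.nil_append]
  rfl
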